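-- pv_equiv track=rewrite | github.com/Artem3213212/cuda_csv_hilite | csv_proc.py | parse_csv_line_as_dict
-- ===== SOURCE A (Python) =====
-- def parse_csv_line_as_dict(s, sep=",", quote='"'):
--     """
--     Parses one CSV line
--     Gets fragments as dict of lists: kind: [offset_start, offset_end]
--     Gets {} for incorrect line
--     """
--     if not s:
--         return {}
--     res = {}
--     col, x0, b = 0, 0, True
--     for x1, c in enumerate(s):
--         if c == sep and b:
--             res[col] = ([x0, x1])
--             x0 = x1 + 1
--             col += 1
--             if x1 + 1 == len(s):
--                 res[col] = ([x1+1, x1+1])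
--         elif c == quote:
--             b = not b
--     if x0 != len(s):
--         res[col] = [x0, len(s)]
--     if not b:
--         return {}
--     else:
--         return res
--     return {}
-- ===== SOURCE B (Python) =====
-- def parse_csv_line_as_dict(s, sep=",", quote='"'):
--     # Pass 1: collect positions of separators that occur outside quotes.
--     bounds = []
--     b = True
--     for i, c in enumerate(s):
--         if c == sep and b:
--             bounds.append(i)
--         elif c == quote:
--             b = not b
--     if not s or not b:
--         return {}
--     # Pass 2: consecutive boundaries delimit the fields.
--     res = {}
--     prev = 0
--     for i, p in enumerate(bounds):
--         res[i] = [prev, p]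
--         prev = p + 1
--     res[len(bounds)] = [prev, len(s)]
--     return res
-- ===== Notes on version B (the rewrite author's own statement) =====
-- stated objective: alternative
-- what changed: Single interleaved loop that mutates the result dict, column counter and field start is replaced by two passes: first collect the out-of-quote separator positions, then emit each field from consecutive boundaries.
import Mathlib
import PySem

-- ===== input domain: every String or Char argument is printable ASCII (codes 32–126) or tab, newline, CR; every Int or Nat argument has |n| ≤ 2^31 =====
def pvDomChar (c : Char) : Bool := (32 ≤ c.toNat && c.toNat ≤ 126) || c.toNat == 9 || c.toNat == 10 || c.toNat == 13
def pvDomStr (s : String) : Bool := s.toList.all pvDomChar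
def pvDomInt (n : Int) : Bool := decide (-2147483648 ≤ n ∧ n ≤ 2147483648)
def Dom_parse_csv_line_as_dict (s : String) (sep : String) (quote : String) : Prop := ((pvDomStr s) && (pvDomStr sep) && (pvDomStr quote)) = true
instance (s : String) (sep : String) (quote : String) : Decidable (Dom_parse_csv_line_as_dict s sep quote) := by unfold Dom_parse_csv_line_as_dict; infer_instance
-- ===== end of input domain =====

-- B: same parse done as two passes — first collect out-of-quote separator positions, then emit the fields between consecutive boundaries (objective: simpler decomposition, same cost).


-- ===== PORT A =====
-- state of A's loop: (res, col, x0, b)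
def pvStepA (n : Int) (sep quote : List Char)
    : PySem.Dict Int (List Int) × Int × Int × Bool → Int × Char →
    PySem.Dict Int (List Int) × Int × Int × Bool
  | (res, col, x0, b), (x1, c) =>
    if [c] = sep ∧ b then
      let res1 := res.insert col [x0, x1]
      let res2 := if x1 + 1 = n then res1.insert (col + 1) [x1 + 1, x1 + 1] else res1
      (res2, col + 1, x1 + 1, b)
    else if [c] = quote then (res, col, x0, !b)
    else (res, col, x0, b)

def parse_csv_line_as_dict (s : String) (sep : String) (quote : String) : List (Int × List Int) :=
  if s.toList = [] then [] else
  let n : Int := (s.toList.length : Int)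
  let st := (PySem.List.enumerate s.toList 0).foldl (pvStepA n sep.toList quote.toList)
      (PySem.Dict.empty, 0, 0, true)
  let res := if st.2.2.1 ≠ n then st.1.insert st.2.1 [st.2.2.1, n] else st.1
  if !st.2.2.2 then [] else res.items

-- ===== PORT B =====
-- state of B's first pass: (bounds, b)
def pvStepB (sep quote : List Char) (st : List Int × Bool) (xc : Int × Char) : List Int × Bool :=
  if [xc.2] = sep ∧ st.2 then (st.1 ++ [xc.1], st.2)
  else if [xc.2] = quote then (st.1, !st.2)
  else st

def parse_csv_line_as_dict_alt (s : String) (sep : String) (quote : String) : List (Int × List Int) :=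
  let st := (PySem.List.enumerate s.toList 0).foldl (pvStepB sep.toList quote.toList) ([], true)
  if s.toList = [] ∨ !st.2 then [] else
  let rp := (PySem.List.enumerate st.1 0).foldl
      (fun (acc : PySem.Dict Int (List Int) × Int) ip => (acc.1.insert ip.1 [acc.2, ip.2], ip.2 + 1))
      (PySem.Dict.empty, 0)
  ((rp.1.insert (st.1.length : Int) [rp.2, (s.toList.length : Int)]).items)

-- ===== PRECONDITION & SPEC =====
def Spec_parse_csv_line_as_dict (s : String) (sep : String) (quote : String) (out : List (Int × List Int)) : Prop := out = parse_csv_line_as_dict_alt s sep quote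
instance (s : String) (sep : String) (quote : String) (out : List (Int × List Int)) : Decidable (Spec_parse_csv_line_as_dict s sep quote out) := by unfold Spec_parse_csv_line_as_dict; infer_instance

-- ===== CLAIM (what is proved, stated in full; the proofs are below) =====
def Claim_equal_parse_csv_line_as_dict : Prop := ∀ (s : String) (sep : String) (quote : String), Dom_parse_csv_line_as_dict s sep quote → Spec_parse_csv_line_as_dict s sep quote (parse_csv_line_as_dict s sep quote)

-- ===== LEMMAS AND PROOFS =====

-- field list generated by consecutive boundaries, starting at key i with field start prev
def pvFields (i prev : Int) : List Int → List (Int × List Int)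
  | [] => []
  | p :: bs => (i, [prev, p]) :: pvFields (i + 1) (p + 1) bs

-- the start offset of the field after all boundaries in bs
def pvPrev (prev : Int) : List Int → Int
  | [] => prev
  | p :: bs => pvPrev (p + 1) bs

theorem pvFields_key_lt : ∀ (bs : List Int) (i prev : Int), ∀ q ∈ pvFields i prev bs, q.1 < i + bs.length := by
  intro bs
  induction bs with
  | nil => intro i prev q hq; simp [pvFields] at hq
  | cons p bs ih =>
    intro i prev q hq
    simp only [pvFields, List.mem_cons] at hq
    rcases hq with rfl | hq
    · show i < i + (((p :: bs).length : Nat) : Int)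
      simp only [List.length_cons]
      push_cast; omega
    · have := ih (i + 1) (p + 1) q hq
      simp at this ⊢; omega

theorem pvPrev_append : ∀ (bs : List Int) (prev p : Int), pvPrev prev (bs ++ [p]) = p + 1 := by
  intro bs
  induction bs with
  | nil => intro prev p; simp [pvPrev]
  | cons q bs ih => intro prev p; simpa [pvPrev] using ih (q + 1) p

theorem pvFields_append : ∀ (bs : List Int) (i prev p : Int),
    pvFields i prev (bs ++ [p]) = pvFields i prev bs ++ [(i + (bs.length : Int), [pvPrev prev bs, p])] := by
  intro bs
  induction bs with
  | nil => intro i prev p; simp [pvFields, pvPrev]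
  | cons q bs ih =>
    intro i prev p
    simp only [List.cons_append, pvFields, pvPrev, ih (i + 1) (q + 1) p, List.length_cons]
    have hcast : i + 1 + (bs.length : Int) = i + ((bs.length + 1 : Nat) : Int) := by push_cast; ring
    rw [hcast]

theorem pvPrev_cases : ∀ (bs : List Int) (prev : Int), pvPrev prev bs = prev ∨ ∃ q ∈ bs, pvPrev prev bs = q + 1 := by
  intro bs
  induction bs with
  | nil => intro prev; left; rfl
  | cons p bs ih =>
    intro prev
    rcases ih (p + 1) with h | ⟨q, hq, h⟩
    · right; exact ⟨p, by simp, by simpa [pvPrev] using h⟩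
    · right; exact ⟨q, by simp [hq], by simpa [pvPrev] using h⟩

theorem pvInsert_fresh (l : List (Int × List Int)) (k : Int) (v : List Int) (h : ∀ q ∈ l, q.1 ≠ k) :
    (PySem.Dict.mk l).insert k v = PySem.Dict.mk (l ++ [(k, v)]) := by
  apply PySem.Dict.ext
  have hc : (PySem.Dict.mk l).contains k = false := by
    by_contra hb
    have hb' : (PySem.Dict.mk l).contains k = true := by
      revert hb; cases ((PySem.Dict.mk l).contains k) <;> simp
    rw [PySem.Dict.contains_iff_mem_keys] at hb'
    simp [PySem.Dict.keys] at hb'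
    obtain ⟨x, hx⟩ := hb'
    exact h (k, x) hx rfl
  rw [PySem.Dict.items_insert_of_not_contains (h := hc)]

-- A's loop state, away from the last character, is determined by B's first-pass state
theorem pvLoopA (n : Int) (sep quote : List Char) :
    ∀ (l : List (Int × Char)) (bs : List Int) (b : Bool),
    (∀ p ∈ l, p.1 + 1 ≠ n) →
    l.foldl (pvStepA n sep quote) (PySem.Dict.mk (pvFields 0 0 bs), ((bs.length : Int), pvPrev 0 bs, b))
      = (PySem.Dict.mk (pvFields 0 0 (l.foldl (pvStepB sep quote) (bs, b)).1),
         (((l.foldl (pvStepB sep quote) (bs, b)).1.length : Int),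
          pvPrev 0 (l.foldl (pvStepB sep quote) (bs, b)).1,
          (l.foldl (pvStepB sep quote) (bs, b)).2)) := by
  intro l
  induction l with
  | nil => intro bs b _; rfl
  | cons xc l ih =>
    intro bs b hlt
    obtain ⟨x1, c⟩ := xc
    have hx1 : x1 + 1 ≠ n := hlt (x1, c) (by simp)
    by_cases hc : [c] = sep ∧ b
    · have hstepA : pvStepA n sep quote (PySem.Dict.mk (pvFields 0 0 bs), ((bs.length : Int), pvPrev 0 bs, b)) (x1, c)
          = (PySem.Dict.mk (pvFields 0 0 (bs ++ [x1])), (((bs ++ [x1]).length : Int), pvPrev 0 (bs ++ [x1]), b)) := by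
        simp only [pvStepA, if_pos hc, if_neg hx1]
        rw [pvInsert_fresh _ _ _ (by intro q hq; have := pvFields_key_lt bs 0 0 q hq; omega)]
        rw [pvFields_append, pvPrev_append]
        simp
      have hstepB : pvStepB sep quote (bs, b) (x1, c) = (bs ++ [x1], b) := by
        simp [pvStepB, hc]
      simp only [List.foldl_cons, hstepA, hstepB]
      exact ih (bs ++ [x1]) b (fun p hp => hlt p (by simp [hp]))
    · by_cases hq : [c] = quote
      · have hstepA : pvStepA n sep quote (PySem.Dict.mk (pvFields 0 0 bs), ((bs.length : Int), pvPrev 0 bs, b)) (x1, c)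
            = (PySem.Dict.mk (pvFields 0 0 bs), ((bs.length : Int), pvPrev 0 bs, !b)) := by
          simp only [pvStepA, if_neg hc, if_pos hq]
        have hstepB : pvStepB sep quote (bs, b) (x1, c) = (bs, !b) := by
          simp only [pvStepB, if_neg hc, if_pos hq]
        simp only [List.foldl_cons, hstepA, hstepB]
        exact ih bs (!b) (fun p hp => hlt p (by simp [hp]))
      · have hstepA : pvStepA n sep quote (PySem.Dict.mk (pvFields 0 0 bs), ((bs.length : Int), pvPrev 0 bs, b)) (x1, c)
            = (PySem.Dict.mk (pvFields 0 0 bs), ((bs.length : Int), pvPrev 0 bs, b)) := by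
          simp only [pvStepA, if_neg hc, if_neg hq]
        have hstepB : pvStepB sep quote (bs, b) (x1, c) = (bs, b) := by
          simp only [pvStepB, if_neg hc, if_neg hq]
        simp only [List.foldl_cons, hstepA, hstepB]
        exact ih bs b (fun p hp => hlt p (List.mem_cons_of_mem _ hp))

-- every boundary B collects comes from the input indices
theorem pvBoundsMem (sep quote : List Char) :
    ∀ (l : List (Int × Char)) (bs : List Int) (b : Bool),
    ∀ q ∈ (l.foldl (pvStepB sep quote) (bs, b)).1, q ∈ bs ∨ q ∈ l.map (·.1) := by
  intro l
  induction l with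
  | nil => intro bs b q hq; left; exact hq
  | cons xc l ih =>
    intro bs b q hq
    simp only [List.foldl_cons] at hq
    rcases ih (pvStepB sep quote (bs, b) xc).1 (pvStepB sep quote (bs, b) xc).2 q (by
      convert hq) with h | h
    · simp only [pvStepB] at h
      split_ifs at h with h1 h2
      · rcases List.mem_append.mp h with h' | h'
        · left; exact h'
        · right; simp at h'; simp [h']
      · left; exact h
      · left; exact h
    · right; simp at h ⊢; tauto

-- B's second pass builds exactly the field list
theorem pvLoopB2 :
    ∀ (bs : List Int) (j prev : Int) (items : List (Int × List Int)),
    (∀ q ∈ items, q.1 < j) →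
    (PySem.List.enumerate bs j).foldl
        (fun (acc : PySem.Dict Int (List Int) × Int) ip => (acc.1.insert ip.1 [acc.2, ip.2], ip.2 + 1))
        (PySem.Dict.mk items, prev)
      = (PySem.Dict.mk (items ++ pvFields j prev bs), pvPrev prev bs) := by
  intro bs
  induction bs with
  | nil => intro j prev items _; simp [PySem.List.enumerate_nil, pvFields, pvPrev]
  | cons p bs ih =>
    intro j prev items hlt
    rw [PySem.List.enumerate_cons]
    simp only [List.foldl_cons]
    rw [pvInsert_fresh _ _ _ (by intro q hq; have := hlt q hq; omega)]
    rw [ih (j + 1) (p + 1) (items ++ [(j, [prev, p])]) (by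
      intro q hq
      rcases List.mem_append.mp hq with h | h
      · have := hlt q h; omega
      · simp at h; rw [h]; simp)]
    simp [pvFields, pvPrev]

-- ===== VERDICT (by name: the statement is the Claim_ definition above) =====
theorem parse_csv_line_as_dict_spec : Claim_equal_parse_csv_line_as_dict := by
  intro s sep quote _
  unfold Spec_parse_csv_line_as_dict parse_csv_line_as_dict parse_csv_line_as_dict_alt
  by_cases h0 : s.toList = []
  · simp [h0, PySem.List.enumerate_nil]
  · obtain ⟨ys, x, hx⟩ : ∃ ys x, s.toList = ys ++ [x] :=
      ⟨_, _, (List.dropLast_append_getLast h0).symm⟩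
    rw [hx]
    have henum : PySem.List.enumerate (ys ++ [x]) 0
        = PySem.List.enumerate ys 0 ++ [((ys.length : Int), x)] := by
      rw [PySem.List.enumerate_append]
      simp [PySem.List.enumerate_cons, PySem.List.enumerate_nil]
    have hne : (ys ++ [x] : List Char) ≠ [] := by simp
    rw [if_neg hne]
    simp only [henum, List.foldl_append, List.foldl_cons, List.foldl_nil]
    set n : Int := (((ys ++ [x]).length : Nat) : Int) with hn
    have hn' : n = (ys.length : Int) + 1 := by rw [hn]; simp
    have hempty : (PySem.Dict.empty : PySem.Dict Int (List Int)) = PySem.Dict.mk [] := rfl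
    rw [hempty]
    rw [show ((PySem.Dict.mk [] : PySem.Dict Int (List Int)), (0 : Int), (0 : Int), true)
        = (PySem.Dict.mk (pvFields 0 0 []), ((([] : List Int).length : Int), pvPrev 0 [], true)) from rfl]
    have hA := pvLoopA n sep.toList quote.toList (PySem.List.enumerate ys 0) [] true (by
      intro p hp
      rw [PySem.List.mem_enumerate_iff] at hp
      obtain ⟨k, hk, rfl⟩ := hp
      simp only [hn']; omega)
    rw [hA]
    set stB := (PySem.List.enumerate ys 0).foldl (pvStepB sep.toList quote.toList) ([], true) with hstB
    obtain ⟨bs₁, b₁⟩ := stB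
    have hbmem : ∀ q ∈ bs₁, (0 : Int) ≤ q ∧ q < (ys.length : Int) := by
      intro q hq
      rcases pvBoundsMem sep.toList quote.toList (PySem.List.enumerate ys 0) [] true q
          (by rw [← hstB]; exact hq) with h | h
      · simp at h
      · rw [PySem.List.map_fst_enumerate, PySem.List.mem_pyRange_one] at h
        simpa using h
    have hx0 : pvPrev 0 bs₁ ≠ n := by
      rcases pvPrev_cases bs₁ 0 with h | ⟨q, hq, h⟩
      · have h1 := hn'; omega
      · have := hbmem q hq; have h1 := hn'; omega
    by_cases hsep : [x] = sep.toList ∧ b₁ = true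
    · -- last character is an unquoted separator
      obtain ⟨hxs, hb₁⟩ := hsep
      subst hb₁
      have key_lt : ∀ q ∈ pvFields 0 0 bs₁, q.1 < (0 : Int) + (bs₁.length : Int) :=
        fun q hq => by exact_mod_cast pvFields_key_lt bs₁ 0 0 q hq
      have hres1 : (PySem.Dict.mk (pvFields 0 0 bs₁)).insert (bs₁.length : Int) [pvPrev 0 bs₁, (ys.length : Int)]
          = PySem.Dict.mk (pvFields 0 0 (bs₁ ++ [(ys.length : Int)])) := by
        rw [pvInsert_fresh _ _ _ (fun q hq => by have := key_lt q hq; omega)]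
        rw [pvFields_append]
        simp
      have key_lt2 : ∀ q ∈ pvFields 0 0 (bs₁ ++ [(ys.length : Int)]), q.1 < (bs₁.length : Int) + 1 := by
        intro q hq
        have := pvFields_key_lt (bs₁ ++ [(ys.length : Int)]) 0 0 q hq
        simp at this
        omega
      have hres2 : (PySem.Dict.mk (pvFields 0 0 (bs₁ ++ [(ys.length : Int)]))).insert ((bs₁.length : Int) + 1)
            [(ys.length : Int) + 1, (ys.length : Int) + 1]
          = PySem.Dict.mk (pvFields 0 0 (bs₁ ++ [(ys.length : Int)]) ++
              [((bs₁.length : Int) + 1, [(ys.length : Int) + 1, (ys.length : Int) + 1])]) :=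
        pvInsert_fresh _ _ _ (fun q hq => by have := key_lt2 q hq; omega)
      have hstepA : pvStepA n sep.toList quote.toList
          (PySem.Dict.mk (pvFields 0 0 bs₁), ((bs₁.length : Int), pvPrev 0 bs₁, true)) ((ys.length : Int), x)
          = (PySem.Dict.mk (pvFields 0 0 (bs₁ ++ [(ys.length : Int)]) ++
              [((bs₁.length : Int) + 1, [(ys.length : Int) + 1, (ys.length : Int) + 1])]),
             ((bs₁.length : Int) + 1, (ys.length : Int) + 1, true)) := by
        simp only [pvStepA, if_pos hn'.symm, hres1, hres2]
        simp [hxs]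
      have hstepB : pvStepB sep.toList quote.toList (bs₁, true) ((ys.length : Int), x)
          = (bs₁ ++ [(ys.length : Int)], true) := by
        simp [pvStepB, hxs]
      rw [hstepA, hstepB]
      rw [if_neg (show ¬((ys.length : Int) + 1 ≠ n) by simp [hn'])]
      rw [if_neg (show ¬((!(true : Bool)) = true) by simp)]
      rw [if_neg (show ¬(ys ++ [x] = [] ∨ (!(true : Bool)) = true) by simp)]
      rw [pvLoopB2 (bs₁ ++ [(ys.length : Int)]) 0 0 [] (by simp)]
      rw [pvPrev_append]
      simp only [List.nil_append]
      rw [pvInsert_fresh _ _ _ (by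
        intro q hq
        have := pvFields_key_lt (bs₁ ++ [(ys.length : Int)]) 0 0 q hq
        simp at this ⊢
        omega)]
      simp [hn']
    · -- last character is not an unquoted separator
      by_cases hq : [x] = quote.toList
      · have hstepA : pvStepA n sep.toList quote.toList
            (PySem.Dict.mk (pvFields 0 0 bs₁), ((bs₁.length : Int), pvPrev 0 bs₁, b₁)) ((ys.length : Int), x)
            = (PySem.Dict.mk (pvFields 0 0 bs₁), ((bs₁.length : Int), pvPrev 0 bs₁, !b₁)) := by
          simp only [pvStepA, if_neg hsep, if_pos hq]
        have hstepB : pvStepB sep.toList quote.toList (bs₁, b₁) ((ys.length : Int), x) = (bs₁, !b₁) := by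
          simp only [pvStepB, if_neg hsep, if_pos hq]
        rw [hstepA, hstepB]
        cases b₁ with
        | true => simp
        | false =>
          rw [if_pos hx0]
          rw [if_neg (show ¬((!(!(false : Bool))) = true) by simp)]
          rw [if_neg (show ¬(ys ++ [x] = [] ∨ (!(!(false : Bool))) = true) by simp)]
          rw [pvLoopB2 bs₁ 0 0 [] (by simp)]
          simp only [List.nil_append]
      · have hstepA : pvStepA n sep.toList quote.toList
            (PySem.Dict.mk (pvFields 0 0 bs₁), ((bs₁.length : Int), pvPrev 0 bs₁, b₁)) ((ys.length : Int), x)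
            = (PySem.Dict.mk (pvFields 0 0 bs₁), ((bs₁.length : Int), pvPrev 0 bs₁, b₁)) := by
          simp only [pvStepA, if_neg hsep, if_neg hq]
        have hstepB : pvStepB sep.toList quote.toList (bs₁, b₁) ((ys.length : Int), x) = (bs₁, b₁) := by
          simp only [pvStepB, if_neg hsep, if_neg hq]
        rw [hstepA, hstepB]
        cases b₁ with
        | false => simp
        | true =>
          rw [if_pos hx0]
          rw [if_neg (show ¬((!(true : Bool)) = true) by simp)]
          rw [if_neg (show ¬(ys ++ [x] = [] ∨ (!(true : Bool)) = true) by simp)]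
          rw [pvLoopB2 bs₁ 0 0 [] (by simp)]
          simp only [List.nil_append]
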